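-- pv_equiv track=rewrite | github.com/rinc3w1nd/TicketTracker | tickettracker/views/settings.py | _stage_labels
-- ===== SOURCE A (Python) =====
-- from typing import Dict, List, Mapping, Tuple
--
-- _DEFAULT_STAGE_LABELS = [
--     "Comfort Zone",
--     "Attention Zone",
--     "Action Zone",
--     "Fire Zone",
-- ]
--
-- def _stage_labels(stage_count: int) -> List[str]:
--     """Return human-friendly labels for SLA stages."""
--
--     if stage_count <= 0:
--         return []
--
--     labels: List[str] = []
--     for index in range(stage_count):
--         if index < len(_DEFAULT_STAGE_LABELS):
--             labels.append(_DEFAULT_STAGE_LABELS[index])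
--         else:
--             labels.append(f"Stage {index + 1}")
--     return labels
-- ===== SOURCE B (Python) =====
-- _DEFAULT_STAGE_LABELS = [
--     "Comfort Zone",
--     "Attention Zone",
--     "Action Zone",
--     "Fire Zone",
-- ]
--
-- def _stage_labels(stage_count):
--     """Return human-friendly labels for SLA stages."""
--     if stage_count <= 0:
--         return []
--     labels = [None] * stage_count
--     for i in range(stage_count - 1, len(_DEFAULT_STAGE_LABELS) - 1, -1):
--         labels[i] = f"Stage {i + 1}"
--     labels[:len(_DEFAULT_STAGE_LABELS)] = _DEFAULT_STAGE_LABELS[:stage_count]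
--     return labels
-- ===== Notes on version B (the rewrite author's own statement) =====
-- stated objective: alternative
-- what changed: B preallocates the whole output list at once ([None] * stage_count), fills the generated 'Stage i' labels back-to-front by index assignment, and finally patches the default prefix in with one slice assignment, instead of A's single forward append loop with a per-index branch.
import Mathlib
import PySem

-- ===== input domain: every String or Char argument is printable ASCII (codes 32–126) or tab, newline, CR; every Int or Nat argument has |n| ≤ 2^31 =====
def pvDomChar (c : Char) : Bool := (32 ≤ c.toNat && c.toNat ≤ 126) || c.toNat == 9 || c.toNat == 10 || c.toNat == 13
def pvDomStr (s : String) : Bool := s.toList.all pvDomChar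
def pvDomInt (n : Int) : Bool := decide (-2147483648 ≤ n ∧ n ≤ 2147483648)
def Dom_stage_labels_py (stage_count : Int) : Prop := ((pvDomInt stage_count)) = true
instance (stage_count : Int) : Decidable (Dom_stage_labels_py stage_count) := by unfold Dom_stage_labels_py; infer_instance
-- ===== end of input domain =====

-- B preallocates the output, fills generated labels back-to-front by index assignment, then patches the default prefix by slice assignment (alternative construction, same cost).

-- module constant _DEFAULT_STAGE_LABELS
def pvDefaults : List String :=
  ["Comfort Zone", "Attention Zone", "Action Zone", "Fire Zone"]

-- ===== PORT A =====
-- literal port of A: guard, then a fold over range(stage_count) appending one label per index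
def stage_labels_py (stage_count : Int) : List String :=
  if stage_count ≤ 0 then []
  else
    (PySem.List.pyRange 0 stage_count 1).foldl
      (fun labels index =>
        if index < (pvDefaults.length : Int) then
          labels ++ [PySem.List.pyGetD pvDefaults index ""]   -- index is in range here, so pyGetD is exact
        else
          labels ++ ["Stage " ++ PySem.Int.toStr (index + 1)])
      []

-- ===== PORT B =====
-- B's loop body 'labels[i] = f"Stage {i + 1}"': every i drawn from the countdown range is ≥ 4 > 0, so i.toNat is exact
def pvFillF (ls : List String) (i : Int) : List String :=
  ls.set i.toNat ("Stage " ++ PySem.Int.toStr (i + 1))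

-- literal port of B: preallocate ([None]*n, placeholder ""), countdown fill by index, then the slice assignment labels[:len(pre)] = pre
def stage_labels_py_alt (stage_count : Int) : List String :=
  if stage_count ≤ 0 then []
  else
    let labels := List.replicate stage_count.toNat ""   -- Python's [None] * stage_count; every placeholder slot is overwritten below
    let filled := (PySem.List.pyRange (stage_count - 1) ((pvDefaults.length : Int) - 1) (-1)).foldl pvFillF labels
    let pre := PySem.List.slice pvDefaults none (some stage_count)   -- _DEFAULT_STAGE_LABELS[:stage_count]
    pre ++ filled.drop pre.length                        -- labels[:len(pre)] = pre

-- ===== PRECONDITION & SPEC =====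
def Spec_stage_labels_py (stage_count : Int) (out : List String) : Prop := out = stage_labels_py_alt stage_count
instance (stage_count : Int) (out : List String) : Decidable (Spec_stage_labels_py stage_count out) := by unfold Spec_stage_labels_py; infer_instance

-- ===== CLAIM (what is proved, stated in full; the proofs are below) =====
def Claim_equal_stage_labels_py : Prop := ∀ (stage_count : Int), Dom_stage_labels_py stage_count → Spec_stage_labels_py stage_count (stage_labels_py stage_count)

-- ===== LEMMAS AND PROOFS =====

-- the per-index label A produces
def pvLabelAt (j : Nat) : String :=
  if j < 4 then pvDefaults.getD j "" else "Stage " ++ PySem.Int.toStr ((j : Int) + 1)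

theorem pvA_eq_map (k : Nat) (hk : 0 < k) :
    stage_labels_py (k : Int) = (List.range k).map pvLabelAt := by
  unfold stage_labels_py
  rw [if_neg (by omega : ¬ ((k:Int) ≤ 0))]
  have hfun : (fun (labels : List String) (index : Int) =>
      if index < (pvDefaults.length : Int) then
        labels ++ [PySem.List.pyGetD pvDefaults index ""]
      else
        labels ++ ["Stage " ++ PySem.Int.toStr (index + 1)]) =
      (fun labels index => labels ++
        [if index < (pvDefaults.length : Int) then PySem.List.pyGetD pvDefaults index ""
         else "Stage " ++ PySem.Int.toStr (index + 1)]) := by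
    funext l i; split <;> rfl
  rw [hfun, PySem.List.foldl_append_singleton_eq_map, PySem.List.pyRange_one]
  simp only [List.nil_append, Int.sub_zero, Int.toNat_natCast, List.map_map]
  refine List.map_congr_left ?_
  intro j hj
  simp only [Function.comp_def]
  have h0 : (0:Int) + (j:Int) = (j:Int) := by ring
  have hlen : ((pvDefaults.length : Nat) : Int) = 4 := by decide
  rw [h0, hlen]
  unfold pvLabelAt
  by_cases hlt : j < 4
  · rw [if_pos (by omega : (j:Int) < 4), if_pos hlt, PySem.List.pyGetD_natCast]
  · rw [if_neg (by omega : ¬ ((j:Int) < 4)), if_neg hlt]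

theorem pvMap_split (k : Nat) :
    (List.range k).map pvLabelAt =
      pvDefaults.take k ++
        (List.range (k - 4)).map (fun j => "Stage " ++ PySem.Int.toStr ((4 + j : Nat) + 1)) := by
  by_cases hk : k ≤ 4
  · have : k - 4 = 0 := by omega
    rw [this]
    interval_cases k <;> decide
  · obtain ⟨m, rfl⟩ : ∃ m, k = 4 + m := ⟨k - 4, by omega⟩
    rw [List.range_add, List.map_append]
    have h1 : (List.range 4).map pvLabelAt = pvDefaults := by decide
    have h2 : pvDefaults.take (4 + m) = pvDefaults := List.take_of_length_le (by simp [pvDefaults])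
    have h3 : 4 + m - 4 = m := by omega
    rw [h1, h2, h3, List.map_map]
    refine congrArg (_ ++ ·) (List.map_congr_left ?_)
    intro j hj
    have hnl : ¬ (4 + j < 4) := by omega
    simp only [Function.comp_def, pvLabelAt, if_neg hnl]

-- sets at indices strictly inside L do not touch an appended last element
theorem pvFoldl_fill_append (idxs : List Int) :
    ∀ (L : List String) (x : String), (∀ i ∈ idxs, i.toNat < L.length) →
    idxs.foldl pvFillF (L ++ [x]) = idxs.foldl pvFillF L ++ [x] := by
  induction idxs with
  | nil => intro L x _; rfl
  | cons i t ih =>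
    intro L x hb
    have hi : i.toNat < L.length := hb i (List.mem_cons_self)
    have hset : pvFillF (L ++ [x]) i = pvFillF L i ++ [x] := by
      unfold pvFillF
      rw [List.set_append]
      rw [if_pos hi]
    simp only [List.foldl_cons, hset]
    exact ih (pvFillF L i) x (fun j hj => by
      have := hb j (List.mem_cons_of_mem i hj)
      simpa [pvFillF] using this)

-- the countdown fill on the preallocated list: placeholders survive only below index 4
theorem pvFill_eq (m : Nat) :
    (PySem.List.pyRange (((4 + m : Nat) : Int) - 1) 3 (-1)).foldl pvFillF
        (List.replicate (4 + m) "") =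
      List.replicate 4 "" ++
        (List.range m).map (fun t => "Stage " ++ PySem.Int.toStr ((4 + t : Nat) + 1)) := by
  induction m with
  | zero =>
    rw [PySem.List.pyRange_neg_one_eq_nil (by norm_num)]
    simp
  | succ m ih =>
    have hc : (((4 + (m+1) : Nat) : Int) - 1) = ((4 + m : Nat) : Int) := by push_cast; ring
    rw [hc, PySem.List.pyRange_neg_one_cons (by push_cast; omega)]
    have hrep : List.replicate (4 + (m+1)) "" = List.replicate (4 + m) "" ++ [""] := by
      rw [Nat.add_succ, List.replicate_succ']
    rw [hrep]
    simp only [List.foldl_cons]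
    have hfirst : pvFillF (List.replicate (4 + m) "" ++ [""]) ((4 + m : Nat) : Int) =
        List.replicate (4 + m) "" ++ ["Stage " ++ PySem.Int.toStr (((4 + m : Nat) : Int) + 1)] := by
      unfold pvFillF
      rw [List.set_append]
      rw [if_neg (by simp), Int.toNat_natCast]
      simp
    rw [hfirst, pvFoldl_fill_append _ _ _ (fun i hi => by
      rcases (PySem.List.mem_pyRange_neg_one).mp hi with ⟨h3, hle⟩
      have : ((4 + m : Nat) : Int) - 1 ≥ i := hle
      simp only [List.length_replicate]
      omega)]
    rw [ih, List.range_succ, List.map_append]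
    simp only [List.map_cons, List.map_nil, List.append_assoc]

theorem pvB_eq_map (k : Nat) (hk : 0 < k) :
    stage_labels_py_alt (k : Int) = (List.range k).map pvLabelAt := by
  unfold stage_labels_py_alt
  rw [if_neg (by omega : ¬ ((k:Int) ≤ 0))]
  simp only [Int.toNat_natCast]
  have hlen : ((pvDefaults.length : Nat) : Int) = 4 := by decide
  rw [hlen, PySem.List.slice_to_natCast]
  rw [show ((4:Int) - 1) = 3 from by norm_num]
  by_cases hk4 : k ≤ 4
  · have hnil : PySem.List.pyRange ((k : Int) - 1) 3 (-1) = [] :=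
      PySem.List.pyRange_neg_one_eq_nil (by omega)
    rw [hnil]
    simp only [List.foldl_nil]
    have htk : (pvDefaults.take k).length = k := by
      rw [List.length_take]
      simp [pvDefaults]
      omega
    rw [htk, List.drop_replicate]
    simp only [Nat.sub_self, List.replicate_zero, List.append_nil]
    interval_cases k <;> decide
  · obtain ⟨m, rfl⟩ : ∃ m, k = 4 + m := ⟨k - 4, by omega⟩
    rw [pvFill_eq m]
    have htk : pvDefaults.take (4 + m) = pvDefaults := List.take_of_length_le (by simp [pvDefaults])
    rw [htk]
    have hl : pvDefaults.length = 4 := by decide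
    have hrep4 : (List.replicate 4 "" : List String).length = 4 := by decide
    rw [show pvDefaults.length = (List.replicate 4 "" : List String).length from by decide,
      List.drop_left]
    rw [pvMap_split (4 + m), htk]
    have h3 : 4 + m - 4 = m := by omega
    rw [h3]

-- ===== VERDICT (by name: the statement is the Claim_ definition above) =====
theorem stage_labels_py_spec : Claim_equal_stage_labels_py := by
  intro n _
  unfold Spec_stage_labels_py
  by_cases hn : n ≤ 0
  · simp [stage_labels_py, stage_labels_py_alt, hn]
  · obtain ⟨k, rfl⟩ := Int.eq_ofNat_of_zero_le (by omega : (0:Int) ≤ n)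
    rw [pvA_eq_map k (by omega), pvB_eq_map k (by omega)]
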